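-- pv_equiv track=rewrite | github.com/nirvanesque/livnium.core | arch-archive/experiments/ramsey/ramsey_tension.py | count_monochromatic_k4
-- ===== SOURCE A (Python) =====
-- from itertools import combinations
-- from typing import Dict, Tuple, List
--
-- Edge = Tuple[int, int]
--
-- Coloring = Dict[Edge, int]
--
-- def _norm_edge(u: int, v: int) -> Edge:
--     """Always store edges sorted so (i,j) == (j,i)."""
--     return (u, v) if u < v else (v, u)
--
-- def get_all_k4_subsets(vertices: List[int]) -> List[Tuple[int, int, int, int]]:
--     """All 4-vertex subsets (potential K₄s)."""
--     return list(combinations(vertices, 4))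
--
-- def get_k4_edges(k4: Tuple[int, int, int, int]) -> List[Edge]:
--     """Edges of a K₄ (4-vertex complete subgraph)."""
--     a, b, c, d = k4
--     return [
--         _norm_edge(a, b),
--         _norm_edge(a, c),
--         _norm_edge(a, d),
--         _norm_edge(b, c),
--         _norm_edge(b, d),
--         _norm_edge(c, d),
--     ]
--
-- def count_monochromatic_k4(coloring: Coloring, vertices: List[int]) -> int:
--     """
--     Count monochromatic K₄ subgraphs.
--
--     A K₄ is monochromatic if all 6 edges have the same color.
--     """
--     k4s = get_all_k4_subsets(vertices)
--     violations = 0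
--
--     for quad in k4s:
--         edges = get_k4_edges(quad)
--         # Require all edges present
--         if any(e not in coloring for e in edges):
--             continue
--         colors = {coloring[e] for e in edges}
--         if len(colors) == 1:  # all same color
--             violations += 1
--
--     return violations
-- ===== SOURCE B (Python) =====
-- from itertools import combinations
--
--
-- def count_monochromatic_k4(coloring, vertices):
--     # Invert the coloring into color classes, then count all-one-color K4s
--     # per color over only the vertices incident to that color's edges.
--     classes = {}
--     for edge, color in coloring.items():
--         classes.setdefault(color, set()).add(edge)
--     total = 0
--     for edge_set in classes.values():
--         incident = set()
--         for (u, v) in edge_set: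
--             incident.add(u)
--             incident.add(v)
--         verts = [x for x in vertices if x in incident]
--         for a, b, c, d in combinations(verts, 4):
--             quad_edges = ((a, b) if a < b else (b, a),
--                           (a, c) if a < c else (c, a),
--                           (a, d) if a < d else (d, a),
--                           (b, c) if b < c else (c, b),
--                           (b, d) if b < d else (d, b),
--                           (c, d) if c < d else (d, c))
--             if all(e in edge_set for e in quad_edges):
--                 total += 1
--     return total
-- ===== Notes on version B (the rewrite author's own statement) =====
-- stated objective: faster
-- what changed: Instead of one flat scan over every C(n,4) quad with dict lookups and a set-of-colors cardinality test, B first inverts the coloring into a color -> edge-set index and, for each color, enumerates 4-subsets of only the vertices incident to that color's edges, counting quads whose six normalised edges all lie in that color class.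
import Mathlib
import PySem

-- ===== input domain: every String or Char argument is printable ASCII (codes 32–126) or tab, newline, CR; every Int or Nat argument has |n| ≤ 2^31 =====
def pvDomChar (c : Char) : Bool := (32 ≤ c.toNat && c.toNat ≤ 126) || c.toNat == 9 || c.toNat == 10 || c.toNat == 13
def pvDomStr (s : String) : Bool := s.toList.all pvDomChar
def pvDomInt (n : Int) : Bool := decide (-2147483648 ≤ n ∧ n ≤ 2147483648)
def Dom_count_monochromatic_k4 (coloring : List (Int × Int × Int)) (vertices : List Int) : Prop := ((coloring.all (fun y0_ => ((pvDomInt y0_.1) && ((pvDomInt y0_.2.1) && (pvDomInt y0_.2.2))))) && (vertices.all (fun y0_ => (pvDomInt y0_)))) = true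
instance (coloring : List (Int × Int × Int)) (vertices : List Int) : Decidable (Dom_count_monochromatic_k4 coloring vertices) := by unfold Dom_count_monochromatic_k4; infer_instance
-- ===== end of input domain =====

-- B inverts the coloring into a color → edge-set index and counts all-one-color K4s
-- per color over only the vertices incident to that color's edges (objective: faster
-- on colorings whose classes touch few vertices; exact same count).

-- The dict[(int,int),int] argument arrives as a flattened association list (u, v, color);
-- per the type convention, lookup is FIRST match.  Shared lookup helper for both ports:
def edgeGet? : List (Int × Int × Int) → (Int × Int) → Option Int
  | [], _ => none
  | (u, v, c) :: rest, e => if (u, v) = e then some c else edgeGet? rest e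

-- itertools.combinations(l, 4), in itertools order (shared: both Pythons call it)
def combos2 : List Int → List (Int × Int)
  | [] => []
  | x :: xs => (xs.map (fun b => (x, b))) ++ combos2 xs

def combos3 : List Int → List (Int × Int × Int)
  | [] => []
  | x :: xs => ((combos2 xs).map (fun p => (x, p.1, p.2))) ++ combos3 xs

def combos4 : List Int → List (Int × Int × Int × Int)
  | [] => []
  | x :: xs => ((combos3 xs).map (fun p => (x, p.1, p.2.1, p.2.2))) ++ combos4 xs

-- ===== PORT A =====
def normEdge (u v : Int) : Int × Int := if u < v then (u, v) else (v, u)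

def get_k4_edges (q : Int × Int × Int × Int) : List (Int × Int) :=
  [normEdge q.1 q.2.1, normEdge q.1 q.2.2.1, normEdge q.1 q.2.2.2,
   normEdge q.2.1 q.2.2.1, normEdge q.2.1 q.2.2.2, normEdge q.2.2.1 q.2.2.2]

def count_monochromatic_k4 (coloring : List (Int × Int × Int)) (vertices : List Int) : Int :=
  (combos4 vertices).foldl (fun violations quad =>
    let edges := get_k4_edges quad
    if edges.any (fun e => (edgeGet? coloring e).isNone) then violations
    else
      -- {coloring[e] for e in edges}; filterMap is exact here: the guard above
      -- ensures every lookup returns some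
      let colors : PySem.Set Int := PySem.Set.ofList (edges.filterMap (edgeGet? coloring))
      if PySem.Set.len colors = 1 then violations + 1 else violations) 0

-- ===== PORT B =====
-- coloring.items(): under first-match lookup the dict's items are the entries whose key
-- has no earlier occurrence (a Python dict has unique keys; this realises that invariant)
def itemsOf : List (Int × Int × Int) → List ((Int × Int) × Int)
  | [] => []
  | (u, v, c) :: rest => ((u, v), c) :: (itemsOf rest).filter (fun p => decide (p.1 ≠ (u, v)))

-- classes[color].add(edge) over all items (setdefault(color, set()).add(edge))
def classesOf (coloring : List (Int × Int × Int)) : PySem.Dict Int (PySem.Set (Int × Int)) :=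
  (itemsOf coloring).foldl
    (fun d p => d.modify p.2 PySem.Set.empty (fun s => PySem.Set.add s p.1)) PySem.Dict.empty

-- the six normalised edges of the quad, as Source B spells them inline
def quadEdges (a b c d : Int) : List (Int × Int) :=
  [if a < b then (a, b) else (b, a), if a < c then (a, c) else (c, a),
   if a < d then (a, d) else (d, a), if b < c then (b, c) else (c, b),
   if b < d then (b, d) else (d, b), if c < d then (c, d) else (d, c)]

def count_monochromatic_k4_alt (coloring : List (Int × Int × Int)) (vertices : List Int) : Int :=
  (classesOf coloring).values.foldl (fun total s =>
    let incident : PySem.Set Int :=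
      s.foldl (fun iv e => PySem.Set.add (PySem.Set.add iv e.1) e.2) PySem.Set.empty
    let verts := vertices.filter (fun x => incident.contains x)
    (combos4 verts).foldl (fun t q =>
      if (quadEdges q.1 q.2.1 q.2.2.1 q.2.2.2).all (fun e => s.contains e) then t + 1 else t)
      total) 0

-- ===== PRECONDITION & SPEC =====
def Spec_count_monochromatic_k4 (coloring : List (Int × Int × Int)) (vertices : List Int) (out : Int) : Prop := out = count_monochromatic_k4_alt coloring vertices
instance (coloring : List (Int × Int × Int)) (vertices : List Int) (out : Int) : Decidable (Spec_count_monochromatic_k4 coloring vertices out) := by unfold Spec_count_monochromatic_k4; infer_instance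

-- ===== CLAIM (what is proved, stated in full; the proofs are below) =====
def Claim_equal_count_monochromatic_k4 : Prop := ∀ (coloring : List (Int × Int × Int)) (vertices : List Int), Dom_count_monochromatic_k4 coloring vertices → Spec_count_monochromatic_k4 coloring vertices (count_monochromatic_k4 coloring vertices)

-- ===== LEMMAS AND PROOFS =====

-- "quad q is monochromatic of colour c" (all six edges present with that colour)
def monoAt (coloring : List (Int × Int × Int)) (c : Int) (q : Int × Int × Int × Int) : Bool :=
  (get_k4_edges q).all (fun e => decide (edgeGet? coloring e = some c))

-- A's per-quad test as a predicate
def pA (coloring : List (Int × Int × Int)) (q : Int × Int × Int × Int) : Bool :=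
  !(get_k4_edges q).any (fun e => (edgeGet? coloring e).isNone) &&
  decide (PySem.Set.len (PySem.Set.ofList ((get_k4_edges q).filterMap (edgeGet? coloring))) = 1)

lemma foldl_ifcount {α : Type} (p : α → Bool) (l : List α) (n : Int) :
    l.foldl (fun acc x => if p x then acc + 1 else acc) n = n + (l.countP p : Int) := by
  induction l generalizing n with
  | nil => simp
  | cons x l ih =>
    simp only [List.foldl_cons, List.countP_cons, ih]
    by_cases h : p x = true
    · simp [h]
      omega
    · simp [h]

lemma quadEdges_eq (q : Int × Int × Int × Int) :
    quadEdges q.1 q.2.1 q.2.2.1 q.2.2.2 = get_k4_edges q := by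
  rfl

lemma A_eq_countP (coloring : List (Int × Int × Int)) (vertices : List Int) :
    count_monochromatic_k4 coloring vertices = ((combos4 vertices).countP (pA coloring) : Int) := by
  have step : count_monochromatic_k4 coloring vertices
      = (combos4 vertices).foldl (fun acc q => if pA coloring q then acc + 1 else acc) 0 := by
    unfold count_monochromatic_k4
    congr 1
    funext acc q
    by_cases h : (get_k4_edges q).any (fun e => (edgeGet? coloring e).isNone) = true
    · simp [pA, h]
    · simp [pA, h]
  rw [step, foldl_ifcount]
  simp

lemma singleton_of_nodup {l : List Int} (hn : l.Nodup) (c : Int) (hc : c ∈ l)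
    (hall : ∀ x ∈ l, x = c) : l = [c] := by
  cases l with
  | nil => cases hc
  | cons x t =>
    have hx : x = c := hall x (by simp)
    have ht : t = [] := by
      cases t with
      | nil => rfl
      | cons y t' =>
        have hy : y = c := hall y (by simp)
        have : x ≠ y := by
          intro he
          simp [List.nodup_cons, he] at hn
        exact absurd (hx.trans hy.symm) this
    simp [hx, ht]

lemma filterMap_const_of_all {α : Type} (g : α → Option Int) (c : Int) (l : List α)
    (h : ∀ e ∈ l, g e = some c) : l.filterMap g = l.map (fun _ => c) := by
  induction l with
  | nil => rfl
  | cons e t ih =>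
    simp only [List.filterMap_cons, h e (by simp), List.map_cons]
    rw [ih (fun e' he' => h e' (by simp [he']))]

lemma pA_iff (coloring : List (Int × Int × Int)) (q : Int × Int × Int × Int) :
    pA coloring q = true ↔ ∃ c, monoAt coloring c q = true := by
  constructor
  · intro h
    simp only [pA, Bool.and_eq_true, Bool.not_eq_true', List.any_eq_false,
      decide_eq_true_eq] at h
    obtain ⟨hall, hlen⟩ := h
    have hlen' : (PySem.Set.ofList ((get_k4_edges q).filterMap (edgeGet? coloring))).length = 1 := by
      have : PySem.Set.len (PySem.Set.ofList ((get_k4_edges q).filterMap (edgeGet? coloring)))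
          = ((PySem.Set.ofList ((get_k4_edges q).filterMap (edgeGet? coloring))).length : Int) := rfl
      omega
    obtain ⟨c, hc⟩ := List.length_eq_one_iff.mp hlen'
    refine ⟨c, ?_⟩
    simp only [monoAt, List.all_eq_true, decide_eq_true_eq]
    intro e he
    obtain ⟨v, hv⟩ : ∃ v, edgeGet? coloring e = some v := by
      have h' := hall e he
      cases hg : edgeGet? coloring e
      · exfalso; rw [hg] at h'; simp at h'
      · exact ⟨_, rfl⟩
    have hvmem : v ∈ (get_k4_edges q).filterMap (edgeGet? coloring) :=
      List.mem_filterMap.mpr ⟨e, he, hv⟩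
    have : v ∈ PySem.Set.ofList ((get_k4_edges q).filterMap (edgeGet? coloring)) :=
      (PySem.Set.mem_ofList _ _).mpr hvmem
    rw [hc] at this
    simp at this
    rw [hv, this]
  · rintro ⟨c, hmono⟩
    simp only [monoAt, List.all_eq_true, decide_eq_true_eq] at hmono
    have hcolors : (get_k4_edges q).filterMap (edgeGet? coloring)
        = (get_k4_edges q).map (fun _ => c) :=
      filterMap_const_of_all (edgeGet? coloring) c _ hmono
    have hmem : c ∈ PySem.Set.ofList ((get_k4_edges q).filterMap (edgeGet? coloring)) := by
      rw [PySem.Set.mem_ofList, hcolors]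
      simp [get_k4_edges]
    have hallc : ∀ x ∈ PySem.Set.ofList ((get_k4_edges q).filterMap (edgeGet? coloring)), x = c := by
      intro x hx
      rw [PySem.Set.mem_ofList, hcolors] at hx
      simp at hx
      tauto
    have hsingle := singleton_of_nodup (PySem.Set.nodup_ofList _) c hmem hallc
    simp only [pA, Bool.and_eq_true, Bool.not_eq_true', List.any_eq_false, decide_eq_true_eq]
    constructor
    · intro e he
      simp [hmono e he]
    · show PySem.Set.len _ = 1
      rw [hsingle]
      rfl

lemma mem_itemsOf (coloring : List (Int × Int × Int)) (p : (Int × Int) × Int) :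
    p ∈ itemsOf coloring ↔ edgeGet? coloring p.1 = some p.2 := by
  induction coloring with
  | nil => simp [itemsOf, edgeGet?]
  | cons t rest ih =>
    obtain ⟨u, v, c⟩ := t
    by_cases h : (u, v) = p.1
    · simp only [itemsOf, edgeGet?, h, List.mem_cons, List.mem_filter]
      constructor
      · rintro (he | ⟨_, hne⟩)
        · rw [he]; simp
        · simp [← h] at hne
      · intro he
        left
        obtain ⟨p1, p2⟩ := p
        simp_all
    · simp only [itemsOf, edgeGet?, List.mem_cons, List.mem_filter, if_neg h]
      rw [← ih]
      constructor
      · rintro (he | ⟨hm, _⟩)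
        · exfalso; apply h; rw [he]
        · exact hm
      · intro hm
        right
        exact ⟨hm, by simpa using fun he => h he.symm⟩

lemma getD_classes_foldl (l : List ((Int × Int) × Int)) (d : PySem.Dict Int (PySem.Set (Int × Int))) (c : Int) :
    ((l.foldl (fun d p => d.modify p.2 PySem.Set.empty (fun s => PySem.Set.add s p.1)) d).getD c PySem.Set.empty)
      = (l.filter (fun p => p.2 == c)).foldl (fun s p => PySem.Set.add s p.1) (d.getD c PySem.Set.empty) := by
  induction l generalizing d with
  | nil => rfl
  | cons p l ih =>
    simp only [List.foldl_cons, List.filter_cons]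
    rw [ih]
    by_cases h : p.2 = c
    · simp [h]
    · have : (p.2 == c) = false := by simp [h]
      rw [this]
      simp only [Bool.false_eq_true, if_false]
      congr 1
      rw [PySem.Dict.getD_modify]
      simp [Ne.symm h]

lemma mem_classes_getD (coloring : List (Int × Int × Int)) (c : Int) (e : Int × Int) :
    e ∈ (classesOf coloring).getD c PySem.Set.empty ↔ edgeGet? coloring e = some c := by
  rw [classesOf, getD_classes_foldl, PySem.Dict.getD_empty]
  have hfold : ((itemsOf coloring).filter (fun p => p.2 == c)).foldl
      (fun s p => PySem.Set.add s p.1) PySem.Set.empty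
      = PySem.Set.ofList (((itemsOf coloring).filter (fun p => p.2 == c)).map (·.1)) := by
    rw [PySem.Set.ofList_eq_foldl, List.foldl_map]
    rfl
  rw [hfold, PySem.Set.mem_ofList]
  simp only [List.mem_map, List.mem_filter, beq_iff_eq]
  constructor
  · rintro ⟨p, ⟨hm, hc⟩, he⟩
    have := (mem_itemsOf coloring p).mp hm
    rw [he, hc] at this
    exact this
  · intro hg
    exact ⟨(e, c), ⟨(mem_itemsOf coloring (e, c)).mpr hg, rfl⟩, rfl⟩

lemma keys_classes (coloring : List (Int × Int × Int)) :
    (classesOf coloring).keys = PySem.Set.ofList ((itemsOf coloring).map (·.2)) := by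
  rw [classesOf, PySem.Dict.keys_foldl_modify_key]
  rw [PySem.Dict.keys_empty, PySem.Set.ofList_eq_foldl]
  rfl

lemma nodup_keys_classes (coloring : List (Int × Int × Int)) :
    (classesOf coloring).keys.Nodup := by
  rw [keys_classes]
  exact PySem.Set.nodup_ofList _

lemma mem_keys_classes (coloring : List (Int × Int × Int)) (c : Int) :
    c ∈ (classesOf coloring).keys ↔ ∃ e, edgeGet? coloring e = some c := by
  rw [keys_classes, PySem.Set.mem_ofList]
  simp only [List.mem_map]
  constructor
  · rintro ⟨p, hm, hc⟩
    refine ⟨p.1, ?_⟩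
    rw [← hc]
    exact (mem_itemsOf coloring p).mp hm
  · rintro ⟨e, hg⟩
    exact ⟨(e, c), (mem_itemsOf coloring (e, c)).mpr hg, rfl⟩

lemma mem_incident (s : List (Int × Int)) (iv0 : PySem.Set Int) (x : Int) :
    x ∈ s.foldl (fun iv e => PySem.Set.add (PySem.Set.add iv e.1) e.2) iv0 ↔
      x ∈ iv0 ∨ ∃ e ∈ s, x = e.1 ∨ x = e.2 := by
  induction s generalizing iv0 with
  | nil => simp
  | cons e s ih =>
    simp only [List.foldl_cons, ih, PySem.Set.mem_add, List.mem_cons]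
    constructor
    · rintro (((h | h) | h) | ⟨e', he', h⟩)
      · exact Or.inl h
      · exact Or.inr ⟨e, Or.inl rfl, Or.inl h⟩
      · exact Or.inr ⟨e, Or.inl rfl, Or.inr h⟩
      · exact Or.inr ⟨e', Or.inr he', h⟩
    · rintro (h | ⟨e', (he' | he'), h⟩)
      · exact Or.inl (Or.inl (Or.inl h))
      · subst he'
        rcases h with h | h
        · exact Or.inl (Or.inl (Or.inr h))
        · exact Or.inl (Or.inr h)
      · exact Or.inr ⟨e', he', h⟩

lemma combos2_filter (f : Int → Bool) (l : List Int) :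
    combos2 (l.filter f) = (combos2 l).filter (fun p => f p.1 && f p.2) := by
  induction l with
  | nil => rfl
  | cons x xs ih =>
    by_cases hx : f x = true
    · simp only [List.filter_cons, hx, if_true, combos2, List.filter_append, List.filter_map, ih]
      have hcomp : ((fun p : Int × Int => f p.1 && f p.2) ∘ (fun b => (x, b))) = fun b => f b := by
        funext b; simp [hx]
      rw [hcomp]
    · simp only [List.filter_cons, hx, Bool.false_eq_true, if_false, combos2,
        List.filter_append, List.filter_map, ih]
      have hcomp : ((fun p : Int × Int => f p.1 && f p.2) ∘ (fun b => (x, b))) = fun _ => false := by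
        funext b; simp [hx]
      rw [hcomp]
      simp

lemma combos3_filter (f : Int → Bool) (l : List Int) :
    combos3 (l.filter f) = (combos3 l).filter (fun p => f p.1 && f p.2.1 && f p.2.2) := by
  induction l with
  | nil => rfl
  | cons x xs ih =>
    by_cases hx : f x = true
    · simp only [List.filter_cons, hx, if_true, combos3, List.filter_append, List.filter_map,
        ih, combos2_filter]
      have hcomp : ((fun p : Int × Int × Int => f p.1 && f p.2.1 && f p.2.2)
          ∘ (fun p : Int × Int => (x, p.1, p.2))) = fun p : Int × Int => f p.1 && f p.2 := by
        funext p; simp [hx]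
      rw [hcomp]
    · simp only [List.filter_cons, hx, Bool.false_eq_true, if_false, combos3,
        List.filter_append, List.filter_map, ih]
      have hcomp : ((fun p : Int × Int × Int => f p.1 && f p.2.1 && f p.2.2)
          ∘ (fun p : Int × Int => (x, p.1, p.2))) = fun _ => false := by
        funext p; simp [hx]
      rw [hcomp]
      simp

lemma combos4_filter (f : Int → Bool) (l : List Int) :
    combos4 (l.filter f) = (combos4 l).filter (fun p => f p.1 && f p.2.1 && f p.2.2.1 && f p.2.2.2) := by
  induction l with
  | nil => rfl
  | cons x xs ih =>
    by_cases hx : f x = true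
    · simp only [List.filter_cons, hx, if_true, combos4, List.filter_append, List.filter_map,
        ih, combos3_filter]
      have hcomp : ((fun p : Int × Int × Int × Int => f p.1 && f p.2.1 && f p.2.2.1 && f p.2.2.2)
          ∘ (fun p : Int × Int × Int => (x, p.1, p.2.1, p.2.2)))
          = fun p : Int × Int × Int => f p.1 && f p.2.1 && f p.2.2 := by
        funext p; simp [hx]
      rw [hcomp]
    · simp only [List.filter_cons, hx, Bool.false_eq_true, if_false, combos4,
        List.filter_append, List.filter_map, ih]
      have hcomp : ((fun p : Int × Int × Int × Int => f p.1 && f p.2.1 && f p.2.2.1 && f p.2.2.2)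
          ∘ (fun p : Int × Int × Int => (x, p.1, p.2.1, p.2.2))) = fun _ => false := by
        funext p; simp [hx]
      rw [hcomp]
      simp

lemma countP_combos4_filter (f : Int → Bool) (l : List Int) (p : Int × Int × Int × Int → Bool)
    (h : ∀ q, p q = true → f q.1 = true ∧ f q.2.1 = true ∧ f q.2.2.1 = true ∧ f q.2.2.2 = true) :
    (combos4 (l.filter f)).countP p = (combos4 l).countP p := by
  rw [combos4_filter, List.countP_filter]
  apply List.countP_congr
  intro q _
  by_cases hq : p q = true
  · obtain ⟨h1, h2, h3, h4⟩ := h q hq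
    simp [hq, h1, h2, h3, h4]
  · simp [hq]

lemma sum_map_add {α : Type} (l : List α) (f g : α → Nat) :
    (l.map (fun x => f x + g x)).sum = (l.map f).sum + (l.map g).sum := by
  induction l with
  | nil => rfl
  | cons x l ih => simp only [List.map_cons, List.sum_cons, ih]; omega

lemma countP_eq_sum_map {α : Type} (l : List α) (p : α → Bool) :
    l.countP p = (l.map (fun x => if p x then 1 else 0)).sum := by
  induction l with
  | nil => rfl
  | cons x l ih => simp only [List.countP_cons, List.map_cons, List.sum_cons, ih]; omega

lemma sum_countP_swap {α β : Type} (K : List α) (Q : List β) (F : α → β → Bool) :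
    (K.map (fun c => Q.countP (F c))).sum = (Q.map (fun q => K.countP (fun c => F c q))).sum := by
  induction K with
  | nil => simp
  | cons c K ih =>
    simp only [List.map_cons, List.sum_cons, ih]
    have hsplit : (fun q => List.countP (fun c' => F c' q) (c :: K))
        = fun q => (if F c q then 1 else 0) + List.countP (fun c' => F c' q) K := by
      funext q
      simp only [List.countP_cons]
      omega
    rw [hsplit, sum_map_add, ← countP_eq_sum_map]

lemma countP_colors (coloring : List (Int × Int × Int)) (q : Int × Int × Int × Int) :
    ((classesOf coloring).keys.countP (fun c => monoAt coloring c q)) = (if pA coloring q then 1 else 0) := by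
  by_cases hA : pA coloring q = true
  · rw [if_pos hA]
    obtain ⟨c0, hc0⟩ := (pA_iff coloring q).mp hA
    have hc0' := hc0
    simp only [monoAt, List.all_eq_true, decide_eq_true_eq] at hc0'
    have huniq : ∀ c, monoAt coloring c q = true ↔ c = c0 := by
      intro c
      constructor
      · intro hc
        simp only [monoAt, List.all_eq_true, decide_eq_true_eq] at hc
        have h1 : edgeGet? coloring (normEdge q.1 q.2.1) = some c :=
          hc _ (by simp [get_k4_edges])
        have h2 : edgeGet? coloring (normEdge q.1 q.2.1) = some c0 :=
          hc0' _ (by simp [get_k4_edges])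
        exact Option.some.inj (h1.symm.trans h2)
      · rintro rfl
        exact hc0
    have hcong : (classesOf coloring).keys.countP (fun c => monoAt coloring c q)
        = (classesOf coloring).keys.countP (fun c => c == c0) :=
      List.countP_congr (fun c _ => by rw [huniq c]; simp)
    rw [hcong]
    have hmemK : c0 ∈ (classesOf coloring).keys :=
      (mem_keys_classes _ _).mpr ⟨normEdge q.1 q.2.1, hc0' _ (by simp [get_k4_edges])⟩
    have : (classesOf coloring).keys.count c0 = 1 :=
      List.count_eq_one_of_mem (nodup_keys_classes coloring) hmemK
    simpa [List.count] using this
  · rw [if_neg hA]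
    apply List.countP_eq_zero.mpr
    intro c _ hc
    exact hA ((pA_iff coloring q).mpr ⟨c, hc⟩)

lemma inner_count (coloring : List (Int × Int × Int)) (vertices : List Int) (c : Int)
    (s : PySem.Set (Int × Int)) (hs : ∀ e, e ∈ s ↔ edgeGet? coloring e = some c) (total : Int) :
    (combos4 (vertices.filter (fun x =>
        (s.foldl (fun iv e => PySem.Set.add (PySem.Set.add iv e.1) e.2) PySem.Set.empty).contains x))).foldl
      (fun t q => if (quadEdges q.1 q.2.1 q.2.2.1 q.2.2.2).all (fun e => s.contains e) then t + 1 else t)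
      total
    = total + ((combos4 vertices).countP (monoAt coloring c) : Int) := by
  rw [foldl_ifcount]
  congr 1
  have hpred : ∀ q : Int × Int × Int × Int,
      ((quadEdges q.1 q.2.1 q.2.2.1 q.2.2.2).all (fun e => s.contains e)) = monoAt coloring c q := by
    intro q
    rw [quadEdges_eq]
    simp only [monoAt]
    congr 1
    funext e
    simp [hs e]
  have h1 : ∀ (L : List (Int × Int × Int × Int)),
      L.countP (fun q => (quadEdges q.1 q.2.1 q.2.2.1 q.2.2.2).all (fun e => s.contains e))
        = L.countP (monoAt coloring c) :=
    fun L => List.countP_congr (fun q _ => by rw [hpred q])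
  rw [h1]
  have hvert : ∀ u w : Int, edgeGet? coloring (normEdge u w) = some c →
      ((s.foldl (fun iv e => PySem.Set.add (PySem.Set.add iv e.1) e.2) PySem.Set.empty).contains u = true
        ∧ (s.foldl (fun iv e => PySem.Set.add (PySem.Set.add iv e.1) e.2) PySem.Set.empty).contains w = true) := by
    intro u w hg
    have he : normEdge u w ∈ s := (hs _).mpr hg
    constructor
    · have : u ∈ s.foldl (fun iv e => PySem.Set.add (PySem.Set.add iv e.1) e.2) PySem.Set.empty := by
        rw [mem_incident]
        exact Or.inr ⟨normEdge u w, he, by unfold normEdge; split <;> simp⟩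
      simpa using this
    · have : w ∈ s.foldl (fun iv e => PySem.Set.add (PySem.Set.add iv e.1) e.2) PySem.Set.empty := by
        rw [mem_incident]
        exact Or.inr ⟨normEdge u w, he, by unfold normEdge; split <;> simp⟩
      simpa using this
  have := countP_combos4_filter (fun x =>
      (s.foldl (fun iv e => PySem.Set.add (PySem.Set.add iv e.1) e.2) PySem.Set.empty).contains x)
    vertices (monoAt coloring c) ?_
  · rw [this]
  · intro q hq
    simp only [monoAt, List.all_eq_true, decide_eq_true_eq] at hq
    refine ⟨(hvert q.1 q.2.1 (hq _ (by simp [get_k4_edges]))).1,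
            (hvert q.1 q.2.1 (hq _ (by simp [get_k4_edges]))).2,
            (hvert q.1 q.2.2.1 (hq _ (by simp [get_k4_edges]))).2,
            (hvert q.1 q.2.2.2 (hq _ (by simp [get_k4_edges]))).2⟩

lemma foldl_hom_sum {α : Type} (K : List α) (g : Int → α → Int) (cnt : α → Nat)
    (h : ∀ (n : Int) (c : α), g n c = n + (cnt c : Int)) (n : Int) :
    K.foldl g n = n + ((K.map cnt).sum : Int) := by
  induction K generalizing n with
  | nil => simp
  | cons c K ih =>
    rw [List.foldl_cons, h, ih]
    simp only [List.map_cons, List.sum_cons]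
    push_cast
    ring

lemma B_eq_countP (coloring : List (Int × Int × Int)) (vertices : List Int) :
    count_monochromatic_k4_alt coloring vertices = ((combos4 vertices).countP (pA coloring) : Int) := by
  unfold count_monochromatic_k4_alt
  rw [PySem.Dict.values_eq_map_keys _ (nodup_keys_classes coloring) PySem.Set.empty,
    List.foldl_map]
  rw [foldl_hom_sum _ _ (fun c => (combos4 vertices).countP (monoAt coloring c))
    (fun n c => inner_count coloring vertices c _ (fun e => mem_classes_getD coloring c e) n) 0]
  have hswap := sum_countP_swap (classesOf coloring).keys (combos4 vertices)
    (fun c q => monoAt coloring c q)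
  rw [hswap]
  have hmap : ((combos4 vertices).map
        (fun q => (classesOf coloring).keys.countP (fun c => monoAt coloring c q)))
      = (combos4 vertices).map (fun q => if pA coloring q then 1 else 0) :=
    List.map_congr_left (fun q _ => countP_colors coloring q)
  rw [hmap, ← countP_eq_sum_map]
  simp

-- ===== VERDICT (by name: the statement is the Claim_ definition above) =====
theorem count_monochromatic_k4_spec : Claim_equal_count_monochromatic_k4 := by
  intro coloring vertices _
  unfold Spec_count_monochromatic_k4
  rw [A_eq_countP, B_eq_countP]
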